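-- pv_equiv track=rewrite | github.com/rigyeonghong/algorithm | codility/10_4.py | solution
-- ===== SOURCE A (Python) =====
-- def solution(A):
--     peaks = []
--
--     for i in range(1, len(A)-1):
--         if A[i] > A[i-1] and A[i] > A[i+1]:
--             peaks.append(i)
--
--     for i in range(len(peaks),0,-1):
--         if len(A) % i == 0:
--             block_size = len(A) // i
--             block = [False] * i
--             block_cnt = 0
--             for j in range(len(peaks)):
--                 idx = peaks[j] // block_size
--                 if block[idx] == False:
--                     block[idx] = True
--                     block_cnt += 1
--
--             if block_cnt == i:
--                 return block_cnt
--
--     return 0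
-- ===== SOURCE B (Python) =====
-- def solution(A):
--     n = len(A)
--     # nxt[i] = smallest peak index >= i, or n if none; built by one right-to-left scan
--     nxt = [n] * (n + 1)
--     cnt = 0
--     for i in range(n - 1, -1, -1):
--         if 0 < i < n - 1 and A[i] > A[i - 1] and A[i] > A[i + 1]:
--             nxt[i] = i
--             cnt += 1
--         else:
--             nxt[i] = nxt[i + 1]
--     for i in range(cnt, 0, -1):
--         if n % i == 0:
--             size = n // i
--             if all(nxt[b * size] < (b + 1) * size for b in range(i)):
--                 return i
--     return 0
-- ===== Notes on version B (the rewrite author's own statement) =====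
-- stated objective: alternative
-- what changed: Instead of re-scanning the whole peak list and marking a boolean block array for every candidate divisor, B precomputes a next-peak-at-or-after-index array in one right-to-left scan and checks each divisor's i block boundaries directly with early exit via all().
import Mathlib
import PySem

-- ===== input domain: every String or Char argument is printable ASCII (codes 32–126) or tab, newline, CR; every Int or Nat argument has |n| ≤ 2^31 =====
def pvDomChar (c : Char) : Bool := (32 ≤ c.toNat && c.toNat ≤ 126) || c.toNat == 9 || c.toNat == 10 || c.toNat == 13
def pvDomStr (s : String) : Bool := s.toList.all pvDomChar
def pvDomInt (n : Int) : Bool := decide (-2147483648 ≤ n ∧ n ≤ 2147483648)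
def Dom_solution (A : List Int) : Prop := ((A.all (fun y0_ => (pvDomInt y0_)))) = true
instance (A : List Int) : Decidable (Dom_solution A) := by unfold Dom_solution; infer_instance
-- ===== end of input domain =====

-- B replaces A's per-divisor peak-list rescans by a precomputed next-peak array and an
-- early-exiting per-block boundary check (objective: alternative).

-- ===== PORT A =====
-- A[i] > A[i-1] and A[i] > A[i+1], evaluated only for 1 <= i <= len-2 (indices always in range)
def pvPeakA (A : List Int) (i : Nat) : Bool :=
  decide (A.getD (i-1) 0 < A.getD i 0) && decide (A.getD (i+1) 0 < A.getD i 0)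

-- the first loop: peaks collected over range(1, len(A)-1)
def peaksA (A : List Int) : List Nat :=
  (List.range' 1 (A.length - 2)).filter (pvPeakA A)

-- one step of the marking loop over peaks: state = (block, block_cnt)
def markA (size : Nat) (st : List Bool × Nat) (p : Nat) : List Bool × Nat :=
  let idx := p / size
  if st.1.getD idx true = false then (st.1.set idx true, st.2 + 1) else st

-- the body guarded by len(A) % i == 0: mark blocks, compare block_cnt with i
def checkA (A : List Int) (peaks : List Nat) (i : Nat) : Bool :=
  (peaks.foldl (markA (A.length / i)) (List.replicate i false, 0)).2 == i

-- the second loop, i descending from len(peaks) to 1, returning on success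
def loopA (A : List Int) (peaks : List Nat) : Nat → Int
  | 0 => 0
  | (i+1) =>
    if A.length % (i+1) == 0 && checkA A peaks (i+1) then ((i+1 : Nat) : Int)
    else loopA A peaks i

def solution (A : List Int) : Int := loopA A (peaksA A) (peaksA A).length

-- ===== PORT B =====
-- 0 < i < n-1 and A[i] > A[i-1] and A[i] > A[i+1]
def pvPeakB (A : List Int) (i : Nat) : Bool :=
  decide (0 < i) && decide (i + 1 < A.length) &&
  decide (A.getD (i-1) 0 < A.getD i 0) && decide (A.getD (i+1) 0 < A.getD i 0)

-- nxt[i] from B's right-to-left scan: nxt[i] = i if peak else nxt[i+1], nxt[n] = n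
def nxtB (A : List Int) (i : Nat) : Nat :=
  if A.length ≤ i then A.length
  else if pvPeakB A i then i else nxtB A (i+1)
termination_by A.length - i
decreasing_by omega

-- all(nxt[b*size] < (b+1)*size for b in range(i))
def checkB (A : List Int) (i : Nat) : Bool :=
  (List.range i).all (fun b => nxtB A (b * (A.length / i)) < (b + 1) * (A.length / i))

def loopB (A : List Int) : Nat → Int
  | 0 => 0
  | (i+1) =>
    if A.length % (i+1) == 0 && checkB A (i+1) then ((i+1 : Nat) : Int)
    else loopB A i

-- cnt accumulated during the scan = number of indices satisfying the peak test
def solution_alt (A : List Int) : Int :=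
  loopB A ((List.range A.length).countP (pvPeakB A))

-- ===== PRECONDITION & SPEC =====
def Spec_solution (A : List Int) (out : Int) : Prop := out = solution_alt A
instance (A : List Int) (out : Int) : Decidable (Spec_solution A out) := by unfold Spec_solution; infer_instance

-- ===== CLAIM (what is proved, stated in full; the proofs are below) =====
def Claim_equal_solution : Prop := ∀ (A : List Int), Dom_solution A → Spec_solution A (solution A)

-- ===== LEMMAS AND PROOFS =====

theorem pvPeakB_iff (A : List Int) (i : Nat) :
    pvPeakB A i = true ↔ i ∈ peaksA A := by
  simp only [pvPeakB, peaksA, List.mem_filter, List.mem_range'_1, pvPeakA,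
    Bool.and_eq_true, decide_eq_true_eq]
  constructor
  · rintro ⟨⟨⟨h0, h1⟩, h2⟩, h3⟩; exact ⟨⟨h0, by omega⟩, h2, h3⟩
  · rintro ⟨⟨h0, h1⟩, h2, h3⟩; exact ⟨⟨⟨h0, by omega⟩, h2⟩, h3⟩

-- B's on-the-fly peak count equals the length of A's peak list
theorem count_eq_len (A : List Int) :
    (List.range A.length).countP (pvPeakB A) = (peaksA A).length := by
  rw [List.countP_eq_length_filter]
  congr 1
  rcases A with _ | ⟨a, _ | ⟨b, t⟩⟩
  · rfl
  · rfl
  · -- length = t.length + 2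
    have hlen : (a :: b :: t).length = t.length + 2 := by simp
    rw [hlen]
    have hr : List.range (t.length + 2) =
        0 :: (List.range' 1 t.length ++ [1 + t.length]) := by
      rw [List.range_eq_range', List.range'_succ, List.range'_1_concat]
    rw [hr]
    have h0 : pvPeakB (a :: b :: t) 0 = false := by simp [pvPeakB]
    have hl : pvPeakB (a :: b :: t) (1 + t.length) = false := by
      simp [pvPeakB]
    simp only [List.filter_cons, List.filter_append, h0, hl]
    simp only [Bool.false_eq_true, if_false, List.filter_nil, List.append_nil, peaksA, hlen,
      Nat.add_sub_cancel]
    apply List.filter_congr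
    intro x hx
    rw [List.mem_range'_1] at hx
    simp only [pvPeakB, pvPeakA, hlen]
    have h1 : (0 < x) = True := by simp; omega
    have h2 : (x + 1 < t.length + 2) = True := by simp; omega
    simp [h1, h2]

-- nxtB characterization: nxtB A i < j ↔ a peak lies in [i, j), for j ≤ len
theorem nxtB_lt_iff (A : List Int) :
    ∀ i j, j ≤ A.length →
      (nxtB A i < j ↔ ∃ p, i ≤ p ∧ p < j ∧ pvPeakB A p = true) := by
  intro i
  induction' hfuel : A.length - i with k ih generalizing i
  all_goals intro j hj
  · -- i ≥ len
    have hge : A.length ≤ i := by omega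
    rw [nxtB, if_pos hge]
    constructor
    · intro h; omega
    · rintro ⟨p, hip, hpj, hp⟩
      exfalso
      simp only [pvPeakB, Bool.and_eq_true, decide_eq_true_eq] at hp
      omega
  · have hlt : ¬ A.length ≤ i := by omega
    rw [nxtB, if_neg hlt]
    by_cases hp : pvPeakB A i = true
    · rw [if_pos hp]
      constructor
      · intro h; exact ⟨i, le_refl i, h, hp⟩
      · rintro ⟨p, hip, hpj, _⟩; omega
    · rw [if_neg hp]
      rw [ih (i+1) (by omega) j hj]
      constructor
      · rintro ⟨p, hip, hpj, hpk⟩; exact ⟨p, by omega, hpj, hpk⟩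
      · rintro ⟨p, hip, hpj, hpk⟩
        refine ⟨p, ?_, hpj, hpk⟩
        rcases Nat.eq_or_lt_of_le hip with h | h
        · exfalso; rw [← h] at hpk; exact hp hpk
        · omega

-- division into blocks
theorem div_eq_iff_block (size p b : Nat) (hsz : 0 < size) :
    p / size = b ↔ b * size ≤ p ∧ p < (b + 1) * size := by
  constructor
  · intro h
    constructor
    · rw [← h]; exact Nat.div_mul_le_self p size
    · rw [← h]
      have h1 := Nat.div_add_mod p size
      have h2 : p % size < size := Nat.mod_lt _ hsz
      calc p = size * (p / size) + p % size := h1.symm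
        _ < size * (p / size) + size := by omega
        _ = (p / size + 1) * size := by ring
  · rintro ⟨h1, h2⟩
    have hb : b ≤ p / size := (Nat.le_div_iff_mul_le hsz).mpr h1
    have hb2 : p / size < b + 1 := (Nat.div_lt_iff_lt_mul hsz).mpr h2
    omega

-- invariant of A's marking fold
theorem foldA_inv (size : Nat) :
    ∀ (ps : List Nat) (block : List Bool) (cnt : Nat),
      (∀ p ∈ ps, p / size < block.length) →
      cnt = block.count true →
      ((ps.foldl (markA size) (block, cnt)).1.length = block.length ∧
       (ps.foldl (markA size) (block, cnt)).2 = (ps.foldl (markA size) (block, cnt)).1.count true ∧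
       (∀ b, (ps.foldl (markA size) (block, cnt)).1.getD b false = true ↔
          (block.getD b false = true ∨ ∃ p ∈ ps, p / size = b))) := by
  intro ps
  induction ps with
  | nil =>
    intro block cnt _ hcnt
    refine ⟨rfl, hcnt, fun b => by simp⟩
  | cons p ps ih =>
    intro block cnt hmem hcnt
    have hplt : p / size < block.length := hmem p (List.mem_cons_self ..)
    simp only [List.foldl_cons]
    by_cases hb : block.getD (p / size) true = false
    · have hstep : markA size (block, cnt) p = (block.set (p / size) true, cnt + 1) := by
        simp only [markA]; rw [if_pos hb]
      rw [hstep]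
      have hget : block.getD (p / size) true = block[p / size] := List.getD_eq_getElem block true hplt
      have hfalse : block[p / size] = false := by rw [← hget]; exact hb
      have hlen2 : (block.set (p / size) true).length = block.length := by simp
      have hcnt2 : cnt + 1 = (block.set (p / size) true).count true := by
        rw [List.count_set]
        · simp [hfalse, hcnt]
        · exact hplt
      have hmem2 : ∀ q ∈ ps, q / size < (block.set (p / size) true).length := by
        intro q hq; rw [hlen2]; exact hmem q (List.mem_cons_of_mem _ hq)
      obtain ⟨l1, l2, l3⟩ := ih (block.set (p / size) true) (cnt + 1) hmem2 hcnt2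
      refine ⟨by rw [l1, hlen2], l2, ?_⟩
      intro b
      rw [l3 b]
      have hset : (block.set (p / size) true).getD b false =
          if b = p / size then true else block.getD b false := by
        by_cases hbb : b = p / size
        · subst hbb
          rw [if_pos rfl, List.getD_eq_getElem _ false (by rw [hlen2]; exact hplt)]
          simp
        · rw [if_neg hbb]
          by_cases hblen : b < block.length
          · rw [List.getD_eq_getElem _ false (by rw [hlen2]; exact hblen),
                List.getD_eq_getElem _ false hblen]
            simp only [List.getElem_set]
            rw [if_neg (fun h => hbb h.symm)]
          · have hge : block.length ≤ b := by omega
            rw [List.getD_eq_default _ _ (by rw [hlen2]; exact hge),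
                List.getD_eq_default _ _ hge]
      rw [hset]
      by_cases hbb : b = p / size
      · subst hbb
        simp only [if_true]
        constructor
        · intro _; exact Or.inr ⟨p, List.mem_cons_self .., rfl⟩
        · intro _; simp
      · rw [if_neg hbb]
        constructor
        · rintro (h | ⟨q, hq, hqb⟩)
          · exact Or.inl h
          · exact Or.inr ⟨q, List.mem_cons_of_mem _ hq, hqb⟩
        · rintro (h | ⟨q, hq, hqb⟩)
          · exact Or.inl h
          · rcases List.mem_cons.mp hq with rfl | hq'
            · exact absurd hqb.symm hbb
            · exact Or.inr ⟨q, hq', hqb⟩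
    · have hstep : markA size (block, cnt) p = (block, cnt) := by
        simp only [markA]; rw [if_neg hb]
      rw [hstep]
      have hmem2 : ∀ q ∈ ps, q / size < block.length := fun q hq => hmem q (List.mem_cons_of_mem _ hq)
      obtain ⟨l1, l2, l3⟩ := ih block cnt hmem2 hcnt
      refine ⟨l1, l2, ?_⟩
      intro b
      rw [l3 b]
      have htrue : block.getD (p / size) true = true := by
        cases h : block.getD (p / size) true
        · exact absurd h hb
        · rfl
      have hgetT : block.getD (p / size) false = true := by
        rw [List.getD_eq_getElem _ false hplt]
        rw [List.getD_eq_getElem _ true hplt] at htrue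
        exact htrue
      constructor
      · rintro (h | ⟨q, hq, hqb⟩)
        · exact Or.inl h
        · exact Or.inr ⟨q, List.mem_cons_of_mem _ hq, hqb⟩
      · rintro (h | ⟨q, hq, hqb⟩)
        · exact Or.inl h
        · rcases List.mem_cons.mp hq with rfl | hq'
          · exact Or.inl (hqb ▸ hgetT)
          · exact Or.inr ⟨q, hq', hqb⟩

-- checkA characterized: every block 0..i-1 receives some peak
theorem checkA_iff (A : List Int) (i : Nat)
    (hmem : ∀ p ∈ peaksA A, p / (A.length / i) < i) :
    (checkA A (peaksA A) i = true ↔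
      ∀ b < i, ∃ p ∈ peaksA A, p / (A.length / i) = b) := by
  set size := A.length / i with hsz
  obtain ⟨l1, l2, l3⟩ := foldA_inv size (peaksA A) (List.replicate i false) 0
    (by intro p hp; rw [List.length_replicate]; exact hmem p hp) (by simp [List.count_replicate])
  set st := (peaksA A).foldl (markA size) (List.replicate i false, 0) with hst
  have hlen : st.1.length = i := by rw [l1, List.length_replicate]
  have l3' : ∀ b, (st.1.getD b false = true ↔ ∃ p ∈ peaksA A, p / size = b) := by
    intro b
    rw [l3 b]
    constructor
    · rintro (h | h)
      · exfalso
        by_cases hbi : b < i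
        · rw [List.getD_eq_getElem _ false (by rwa [List.length_replicate])] at h
          rw [List.getElem_replicate] at h
          exact Bool.false_ne_true h
        · rw [List.getD_eq_default _ false (by rw [List.length_replicate]; omega)] at h
          exact Bool.false_ne_true h
      · exact h
    · intro h; exact Or.inr h
  unfold checkA
  rw [← hsz, ← hst, beq_iff_eq, l2]
  constructor
  · intro hall b hb
    rw [← l3' b]
    have : ∀ x ∈ st.1, true = x := (List.count_eq_length (l := st.1) (a := true)).mp (by rw [hall, hlen])
    rw [List.getD_eq_getElem _ false (by omega)]
    exact (this _ (List.getElem_mem _)).symm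
  · intro hall
    rw [List.count_eq_length.mpr, hlen]
    intro x hx
    obtain ⟨b, hb, rfl⟩ := List.mem_iff_getElem.mp hx
    rw [hlen] at hb
    have := (l3' b).mpr (hall b hb)
    rw [List.getD_eq_getElem _ false (by omega)] at this
    exact this.symm

-- the two per-divisor checks agree
theorem check_eq (A : List Int) (i : Nat) (hi : 0 < i) (hne : peaksA A ≠ [])
    (hdvd : A.length % i = 0) :
    checkA A (peaksA A) i = checkB A i := by
  set n := A.length with hn
  set size := n / i with hsz
  -- basic size facts
  obtain ⟨p0, hp0⟩ := List.exists_mem_of_ne_nil _ hne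
  have hp0' : p0 ∈ List.range' 1 (n - 2) ∧ pvPeakA A p0 = true := List.mem_filter.mp hp0
  have hn3 : 3 ≤ n := by
    have := List.mem_range'_1.mp hp0'.1
    omega
  have hmul : i * size = n := by
    rw [hsz]; exact Nat.mul_div_cancel' (Nat.dvd_of_mod_eq_zero hdvd)
  have hszpos : 0 < size := by
    rcases Nat.eq_zero_or_pos size with h | h
    · exfalso; rw [h, Nat.mul_zero] at hmul; omega
    · exact h
  have hmem : ∀ p ∈ peaksA A, p / size < i := by
    intro p hp
    have hpr := (List.mem_filter.mp hp).1
    have hpn : p < n := by have := List.mem_range'_1.mp hpr; omega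
    rw [Nat.div_lt_iff_lt_mul hszpos]
    omega
  rw [Bool.eq_iff_iff, checkA_iff A i hmem]
  unfold checkB
  rw [List.all_eq_true]
  constructor
  · intro h b hb
    rw [List.mem_range] at hb
    have hub : (b + 1) * size ≤ n := by
      calc (b + 1) * size ≤ i * size := Nat.mul_le_mul_right _ (by omega)
        _ = n := hmul
    rw [decide_eq_true_eq, nxtB_lt_iff A (b * size) ((b + 1) * size) hub]
    obtain ⟨p, hp, hpd⟩ := h b hb
    refine ⟨p, ?_, ?_, (pvPeakB_iff A p).mpr hp⟩
    · exact ((div_eq_iff_block size p b hszpos).mp hpd).1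
    · exact ((div_eq_iff_block size p b hszpos).mp hpd).2
  · intro h b hb
    have hub : (b + 1) * size ≤ n := by
      calc (b + 1) * size ≤ i * size := Nat.mul_le_mul_right _ (by omega)
        _ = n := hmul
    have := h b (List.mem_range.mpr hb)
    rw [decide_eq_true_eq, nxtB_lt_iff A (b * size) ((b + 1) * size) hub] at this
    obtain ⟨p, h1, h2, h3⟩ := this
    exact ⟨p, (pvPeakB_iff A p).mp h3, (div_eq_iff_block size p b hszpos).mpr ⟨h1, h2⟩⟩

-- the two descending loops agree
theorem loop_eq (A : List Int) :
    ∀ i, i ≤ (peaksA A).length → loopA A (peaksA A) i = loopB A i := by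
  intro i
  induction i with
  | zero => intro _; rfl
  | succ k ih =>
    intro hle
    have hne : peaksA A ≠ [] := by
      intro h; rw [h] at hle; simp at hle
    unfold loopA loopB
    by_cases hmod : A.length % (k+1) = 0
    · rw [check_eq A (k+1) (Nat.succ_pos k) hne hmod]
      by_cases hc : checkB A (k+1) = true
      · simp [hmod, hc]
      · simp only [Bool.and_eq_true, beq_iff_eq]
        rw [if_neg (by tauto), if_neg (by tauto)]
        exact ih (by omega)
    · simp only [Bool.and_eq_true, beq_iff_eq]
      rw [if_neg (by tauto), if_neg (by tauto)]
      exact ih (by omega)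

-- ===== VERDICT (by name: the statement is the Claim_ definition above) =====
theorem solution_spec : Claim_equal_solution := by
  intro A _
  unfold Spec_solution solution solution_alt
  rw [count_eq_len]
  exact loop_eq A (peaksA A).length (le_refl _)
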